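-- pv_equiv track=rewrite | github.com/algirdasN/advent_of_code_2025 | 12.py | grid_to_shape
-- ===== SOURCE A (Python) =====
-- def grid_to_shape(shape_grid):
--     variants = []
--     for _ in range(4):
--         variants.append(grid_to_ints(shape_grid))
--         shape_grid = rotate_grid(shape_grid)
--
--     shape_grid = [list(row) for row in zip(*shape_grid)]
--     for _ in range(4):
--         variants.append(grid_to_ints(shape_grid))
--         shape_grid = rotate_grid(shape_grid)
--
--     return frozenset(variants)
--
-- def grid_to_ints(grid):
--     result = [0 for _ in grid]
--
--     for index, row in enumerate(grid):
--         for cell in reversed(row):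
--             result[index] <<= 1
--             result[index] += cell == "#"
--
--     return tuple(result)
--
-- def rotate_grid(grid):
--     new_grid = [["."] * len(x) for x in grid]
--     for i in range(len(grid)):
--         for j in range(len(grid[0])):
--             new_grid[j][len(grid) - 1 - i] = grid[i][j]
--
--     return new_grid
-- ===== SOURCE B (Python) =====
-- def grid_to_shape(shape_grid):
--     rows = len(shape_grid)
--     cols = len(shape_grid[0]) if shape_grid else 0
--     cells = [(r, c) for r in range(rows) for c in range(cols)
--                     if shape_grid[r][c] == "#"]
--
--     def rot(img):
--         (R, C), pts = img
--         return ((C, R), [(c, R - 1 - r) for r, c in pts])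
--
--     def transpose(img):
--         (R, C), pts = img
--         return ((C, R), [(c, r) for r, c in pts])
--
--     def encode(img):
--         (R, C), pts = img
--         out = [0] * R
--         for r, c in pts:
--             out[r] += 1 << c
--         return tuple(out)
--
--     images = []
--     img = ((rows, cols), cells)
--     for _ in range(4):
--         images.append(img)
--         img = rot(img)
--     img = transpose(((rows, cols), cells))
--     for _ in range(4):
--         images.append(img)
--         img = rot(img)
--     return frozenset(encode(i) for i in images)
-- ===== Notes on version B (the rewrite author's own statement) =====
-- stated objective: faster
-- what changed: B represents the shape as a list of (row,col) coordinates of '#' cells with its (rows,cols) dimensions, generates the 8 dihedral images by transforming coordinates ((r,c)->(c,R-1-r) rotation, (r,c)->(c,r) transpose) and bit-encodes each image directly, so the grid is scanned once and each further orientation costs only the coordinate list, instead of A's rebuilding of rotated character grids with nested index-assignment loops and re-scanning every cell of every grid.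
-- outside the precondition, e.g. on grid_to_shape([[], ['#']]): A returns {(0, 1), (), (0, 0)}, B returns {(), (0, 0)}; on grid_to_shape([['a', 'b'], ['c', 'd', 'e']]): A returns {(0, 0)}, B returns {(0, 0)}
import Mathlib
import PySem

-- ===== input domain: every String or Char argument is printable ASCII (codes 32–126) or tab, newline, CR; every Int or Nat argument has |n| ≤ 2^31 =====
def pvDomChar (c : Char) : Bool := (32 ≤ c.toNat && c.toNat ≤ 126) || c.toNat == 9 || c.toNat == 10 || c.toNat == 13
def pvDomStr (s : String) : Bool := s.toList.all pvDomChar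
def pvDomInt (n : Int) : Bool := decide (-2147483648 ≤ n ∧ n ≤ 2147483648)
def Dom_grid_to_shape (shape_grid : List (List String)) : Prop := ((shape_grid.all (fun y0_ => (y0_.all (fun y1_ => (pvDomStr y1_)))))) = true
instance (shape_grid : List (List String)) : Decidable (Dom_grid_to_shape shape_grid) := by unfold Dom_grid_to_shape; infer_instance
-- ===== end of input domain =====

-- B re-implements the D4-orbit encoding on a coordinate list of '#' cells (transforming (r,c) pairs and bit-encoding
-- them directly) instead of rebuilding rotated character grids with nested index loops; objective: faster (measured).

-- ===== PORT A =====
-- grid_to_ints: result[index] = bits of row (row[c] == "#" has weight 2^c)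
def pvGridToInts (grid : List (List String)) : List Int :=
  (PySem.List.enumerate grid).foldl
    (fun result iv =>
      iv.2.reverse.foldl
        (fun res cell =>
          PySem.List.pySetD res iv.1
            (PySem.List.pyGetD res iv.1 0 * 2 + (if cell == "#" then 1 else 0)))
        result)
    (grid.map (fun _ => (0 : Int)))

-- rotate_grid: new_grid[j][len(grid)-1-i] = grid[i][j]
def pvRotateGrid (grid : List (List String)) : List (List String) :=
  (PySem.List.pyRange 0 (grid.length : Int) 1).foldl
    (fun ng i =>
      (PySem.List.pyRange 0 ((PySem.List.pyGetD grid 0 []).length : Int) 1).foldl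
        (fun ng2 j =>
          PySem.List.pySetD ng2 j
            (PySem.List.pySetD (PySem.List.pyGetD ng2 j [])
              ((grid.length : Int) - 1 - i)
              (PySem.List.pyGetD (PySem.List.pyGetD grid i []) j "")))
        ng)
    (grid.map (fun x => List.replicate x.length "."))

-- [list(row) for row in zip(*grid)]: zip truncates to the shortest row (hand port, exact)
def pvZipStar (grid : List (List String)) : List (List String) :=
  (List.range (((grid.map List.length).min?).getD 0)).map
    (fun j => grid.map (fun row => row.getD j ""))

def grid_to_shape (shape_grid : List (List String)) : List (List Int) :=
  let p1 := (List.range 4).foldl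
    (fun (p : List (List Int) × List (List String)) _ =>
      (p.1 ++ [pvGridToInts p.2], pvRotateGrid p.2)) ([], shape_grid)
  let g := pvZipStar p1.2
  let p2 := (List.range 4).foldl
    (fun (p : List (List Int) × List (List String)) _ =>
      (p.1 ++ [pvGridToInts p.2], pvRotateGrid p.2)) (p1.1, g)
  PySem.Set.ofList p2.1

-- ===== PORT B =====
-- cells: coordinate list of '#' cells, row-major index loops over (rows, cols)
def pvCells (g : List (List String)) (rows cols : Int) : List (Int × Int) :=
  (PySem.List.pyRange 0 rows 1).flatMap
    (fun r => (PySem.List.pyRange 0 cols 1).filterMap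
      (fun c => if PySem.List.pyGetD (PySem.List.pyGetD g r []) c "" == "#"
        then some (r, c) else none))

-- rot: ((R,C),pts) -> ((C,R), [(c, R-1-r)])
def pvRot (img : (Int × Int) × List (Int × Int)) : (Int × Int) × List (Int × Int) :=
  ((img.1.2, img.1.1), img.2.map (fun p => (p.2, img.1.1 - 1 - p.1)))

-- transpose: ((R,C),pts) -> ((C,R), [(c, r)])
def pvTrans (img : (Int × Int) × List (Int × Int)) : (Int × Int) × List (Int × Int) :=
  ((img.1.2, img.1.1), img.2.map (fun p => (p.2, p.1)))

-- encode: out = [0]*R; out[r] += 1 << c   (1 <<< c.toNat is exact: coordinates are ≥ 0)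
def pvEncode (img : (Int × Int) × List (Int × Int)) : List Int :=
  img.2.foldl
    (fun out p => PySem.List.pySetD out p.1 (PySem.List.pyGetD out p.1 0 + ((1 : Int) <<< p.2.toNat)))
    (List.replicate img.1.1.toNat (0 : Int))

def grid_to_shape_alt (shape_grid : List (List String)) : List (List Int) :=
  let rows : Int := shape_grid.length
  let cols : Int := (shape_grid.headD []).length
  let cells := pvCells shape_grid rows cols
  let p1 := (List.range 4).foldl
    (fun (p : List (List Int) × ((Int × Int) × List (Int × Int))) _ =>
      (p.1 ++ [pvEncode p.2], pvRot p.2)) ([], ((rows, cols), cells))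
  let p2 := (List.range 4).foldl
    (fun (p : List (List Int) × ((Int × Int) × List (Int × Int))) _ =>
      (p.1 ++ [pvEncode p.2], pvRot p.2)) (p1.1, pvTrans ((rows, cols), cells))
  PySem.Set.ofList p2.1

-- ===== PRECONDITION & SPEC =====
-- Pre_ admits square grids and all-rows-empty grids: on any other grid Python A raises IndexError in
-- rotate_grid, except for accidental jagged cases (first row shorter than some later row) where
-- rotate_grid silently copies nothing and A's value is an artefact of its implementation — excluded.
def Pre_grid_to_shape (shape_grid : List (List String)) : Prop :=
  (∀ row ∈ shape_grid, row.length = shape_grid.length) ∨ (∀ row ∈ shape_grid, row.length = 0)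
instance (shape_grid : List (List String)) : Decidable (Pre_grid_to_shape shape_grid) := by unfold Pre_grid_to_shape; infer_instance

def pvWitness_grid_to_shape : List (List String) := [["#", "."], [".", "#"]]

def Spec_grid_to_shape (shape_grid : List (List String)) (out : List (List Int)) : Prop := out = grid_to_shape_alt shape_grid
instance (shape_grid : List (List String)) (out : List (List Int)) : Decidable (Spec_grid_to_shape shape_grid out) := by unfold Spec_grid_to_shape; infer_instance

-- ===== CLAIM (what is proved, stated in full; the proofs are below) =====
def Claim_equal_grid_to_shape : Prop := ∀ (shape_grid : List (List String)), Dom_grid_to_shape shape_grid → Pre_grid_to_shape shape_grid → Spec_grid_to_shape shape_grid (grid_to_shape shape_grid)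

-- ===== LEMMAS AND PROOFS =====

-- grid in "range-map normal form": n×n grid whose (r,c) entry is φ r c
def gN (n : Nat) (φ : Nat → Nat → String) : List (List String) :=
  (List.range n).map (fun r => (List.range n).map (φ r))

-- bit value of a boolean row predicate
def encN (n : Nat) (b : Nat → Bool) : Int :=
  ∑ c ∈ Finset.range n, (if b c then (2:Int)^c else 0)

lemma rangeMap_congr {α : Type} (n : Nat) (f g : Nat → α) (h : ∀ i, i < n → f i = g i) :
    (List.range n).map f = (List.range n).map g :=
  List.map_congr_left (fun i hi => h i (List.mem_range.mp hi))

lemma gN_congr (n : Nat) (φ ψ : Nat → Nat → String)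
    (h : ∀ r c, r < n → c < n → φ r c = ψ r c) : gN n φ = gN n ψ :=
  rangeMap_congr n _ _ (fun r hr => rangeMap_congr n _ _ (fun c hc => h r c hr hc))

lemma set_rangeMap {α : Type} (n j : Nat) (hj : j < n) (F : Nat → α) (v : α) :
    ((List.range n).map F).set j v = (List.range n).map (fun t => if t = j then v else F t) := by
  apply List.ext_getElem (by simp)
  intro i h1 h2
  simp only [List.length_map, List.length_range] at h2
  rw [List.getElem_set]
  simp only [List.getElem_map, List.getElem_range]
  by_cases hij : j = i
  · subst hij; simp
  · rw [if_neg hij, if_neg (fun h => hij h.symm)]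

lemma length_gN (n : Nat) (φ : Nat → Nat → String) : (gN n φ).length = n := by
  simp [gN]

lemma pyGetD_gN (n : Nat) (φ : Nat → Nat → String) (j : Nat) (hj : j < n) :
    PySem.List.pyGetD (gN n φ) (j : Int) [] = (List.range n).map (φ j) := by
  rw [PySem.List.pyGetD_ofNat _ _ _ (by simp [length_gN, hj])]
  simp [gN]

-- ===== A side: rotate_grid on a normal-form grid =====

lemma rotate_inner (n p : Nat) (hp : p < n) (w : Nat → String) :
    ∀ (m : Nat), m ≤ n → ∀ (ψ : Nat → Nat → String),
    (List.range m).foldl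
      (fun ng2 (j : Nat) => PySem.List.pySetD ng2 ((j : Nat) : Int)
        (PySem.List.pySetD (PySem.List.pyGetD ng2 ((j : Nat) : Int) []) (((p : Nat) : Int)) (w j)))
      (gN n ψ)
    = gN n (fun j k => if j < m ∧ k = p then w j else ψ j k) := by
  intro m
  induction m with
  | zero =>
    intro _ ψ
    simp only [List.range_zero, List.foldl_nil]
    exact gN_congr n _ _ (fun r c _ _ => by simp)
  | succ m ih =>
    intro hm ψ
    rw [List.range_succ, List.foldl_append, ih (by omega) ψ]
    simp only [List.foldl_cons, List.foldl_nil]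
    rw [pyGetD_gN n _ m (by omega)]
    rw [PySem.List.pySetD_natCast, PySem.List.pySetD_natCast]
    rw [set_rangeMap n p hp]
    rw [show (gN n fun j k => if j < m ∧ k = p then w j else ψ j k) =
        (List.range n).map (fun r => (List.range n).map
          (fun k => if r < m ∧ k = p then w r else ψ r k)) from rfl]
    rw [set_rangeMap n m (by omega)]
    apply rangeMap_congr
    intro j hj
    by_cases hjm : j = m
    · subst hjm
      rw [if_pos rfl]
      apply rangeMap_congr
      intro k hk
      simp only []
      split_ifs <;> first | rfl | omega
    · rw [if_neg hjm]
      apply rangeMap_congr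
      intro k hk
      simp only []
      split_ifs <;> first | rfl | omega

lemma rotate_outer (n : Nat) (hn : 0 < n) (φ : Nat → Nat → String) :
    ∀ (t : Nat), t ≤ n →
    (List.range t).foldl
      (fun ng (i : Nat) =>
        (List.range n).foldl
          (fun ng2 (j : Nat) =>
            PySem.List.pySetD ng2 ((j : Nat) : Int)
              (PySem.List.pySetD (PySem.List.pyGetD ng2 ((j : Nat) : Int) [])
                ((n : Int) - 1 - ((i : Nat) : Int))
                (PySem.List.pyGetD (PySem.List.pyGetD (gN n φ) ((i : Nat) : Int) []) ((j : Nat) : Int) "")))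
          ng)
      (gN n (fun _ _ => "."))
    = gN n (fun j k => if n - t ≤ k then φ (n - 1 - k) j else ".") := by
  intro t
  induction t with
  | zero =>
    intro _
    simp only [List.range_zero, List.foldl_nil]
    exact gN_congr n _ _ (fun r c _ hc => by rw [if_neg (by omega)])
  | succ t ih =>
    intro ht
    rw [List.range_succ, List.foldl_append, ih (by omega)]
    simp only [List.foldl_cons, List.foldl_nil]
    have hpos : ((n : Int) - 1 - (t : Int)) = (((n - 1 - t : Nat)) : Int) := by omega
    rw [show (fun (ng2 : List (List String)) (j : Nat) =>
        PySem.List.pySetD ng2 ((j:Nat) : Int)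
          (PySem.List.pySetD (PySem.List.pyGetD ng2 ((j:Nat) : Int) [])
            (((n:Int)) - 1 - ((t:Nat) : Int))
            (PySem.List.pyGetD (PySem.List.pyGetD (gN n φ) ((t:Nat) : Int) []) ((j:Nat) : Int) "")))
        = (fun (ng2 : List (List String)) (j : Nat) =>
        PySem.List.pySetD ng2 ((j:Nat) : Int)
          (PySem.List.pySetD (PySem.List.pyGetD ng2 ((j:Nat) : Int) [])
            ((((n - 1 - t : Nat)) : Nat) : Int)
            (PySem.List.pyGetD ((List.range n).map (φ t)) ((j:Nat) : Int) ""))) from by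
      funext ng2 j
      rw [pyGetD_gN n φ t (by omega), hpos]]
    rw [rotate_inner n (n - 1 - t) (by omega)
        (fun j => PySem.List.pyGetD ((List.range n).map (φ t)) ((j:Nat) : Int) "") n (le_refl n)]
    apply gN_congr
    intro j k hj hk
    by_cases hkt : k = n - 1 - t
    · rw [if_pos ⟨hj, hkt⟩, if_pos (by omega)]
      rw [PySem.List.pyGetD_ofNat _ _ _ (by simp [hj])]
      simp only [List.getElem_map, List.getElem_range]
      congr 1
      omega
    · rw [if_neg (by omega)]
      by_cases h1 : n - (t+1) ≤ k
      · rw [if_pos h1, if_pos (by omega)]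
      · rw [if_neg h1, if_neg (by omega)]

lemma rotate_gN (n : Nat) (hn : 0 < n) (φ : Nat → Nat → String) :
    pvRotateGrid (gN n φ) = gN n (fun j k => φ (n - 1 - k) j) := by
  unfold pvRotateGrid
  have hrep : (gN n φ).map (fun x => List.replicate x.length ".") = gN n (fun _ _ => ".") := by
    simp only [gN, List.map_map]
    apply rangeMap_congr
    intro r _
    simp [Function.comp, List.map_const']
  have h0 : (PySem.List.pyGetD (gN n φ) (0 : Int) []).length = n := by
    rw [show ((0:Int) = ((0:Nat):Int)) from rfl, pyGetD_gN n φ 0 hn]; simp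
  rw [hrep, length_gN, h0]
  rw [PySem.List.pyRange_one, show (((n:Nat):Int) - 0).toNat = n by omega]
  simp only [List.foldl_map, zero_add]
  rw [rotate_outer n hn φ n (le_refl n)]
  exact gN_congr n _ _ (fun r c _ hc => by rw [if_pos (by omega)])

-- ===== A side: grid_to_ints on a normal-form grid =====

lemma rowFold (ind : String → Int) :
    ∀ (cells : List String) (res : List Int) (j : Nat), j < res.length →
    cells.foldl (fun res2 cell => PySem.List.pySetD res2 ((j : Nat) : Int)
        (PySem.List.pyGetD res2 ((j : Nat) : Int) 0 * 2 + ind cell)) res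
    = res.set j (cells.foldl (fun a cell => a * 2 + ind cell) (res.getD j 0)) := by
  intro cells
  induction cells with
  | nil =>
    intro res j hj
    simp only [List.foldl_nil]
    rw [List.getD_eq_getElem _ _ hj, List.set_getElem_self]
  | cons c cs ih =>
    intro res j hj
    simp only [List.foldl_cons]
    rw [PySem.List.pySetD_natCast, PySem.List.pyGetD_ofNat _ _ _ hj]
    rw [ih (res.set j _) j (by simpa using hj)]
    rw [List.set_set]
    rw [List.getD_eq_getElem _ _ (by simpa using hj), List.getElem_set_self,
        List.getD_eq_getElem _ _ hj]

lemma intsOuter (n : Nat) (row : Nat → List String) (ind : String → Int) :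
    ∀ (t : Nat), t ≤ n →
    (List.range t).foldl
      (fun res (j : Nat) => (row j).foldl
        (fun res2 cell => PySem.List.pySetD res2 ((j : Nat) : Int)
          (PySem.List.pyGetD res2 ((j : Nat) : Int) 0 * 2 + ind cell)) res)
      ((List.range n).map (fun _ => (0 : Int)))
    = (List.range n).map (fun r => if r < t then
        (row r).foldl (fun a cell => a * 2 + ind cell) 0 else 0) := by
  intro t
  induction t with
  | zero =>
    intro _
    simp only [List.range_zero, List.foldl_nil]
    exact rangeMap_congr n _ _ (fun r _ => by simp)
  | succ t ih =>
    intro ht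
    rw [List.range_succ, List.foldl_append, ih (by omega)]
    simp only [List.foldl_cons, List.foldl_nil]
    rw [rowFold ind (row t) _ t (by simp; omega)]
    rw [List.getD_eq_getElem _ _ (by simp; omega)]
    simp only [List.getElem_map, List.getElem_range]
    rw [if_neg (lt_irrefl t)]
    rw [set_rangeMap n t (by omega)]
    apply rangeMap_congr
    intro r hr
    by_cases hrt : r = t
    · subst hrt; rw [if_pos rfl, if_pos (by omega)]
    · rw [if_neg hrt]; split_ifs <;> first | rfl | omega

lemma encFold (l : List String) (acc : Int) :
    l.reverse.foldl (fun a cell => a * 2 + (if cell == "#" then (1:Int) else 0)) acc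
    = acc * 2 ^ l.length + ∑ c ∈ Finset.range l.length, (if l.getD c "" == "#" then (2:Int)^c else 0) := by
  induction l generalizing acc with
  | nil => simp
  | cons x xs ih =>
    simp only [List.reverse_cons, List.foldl_append, List.foldl_cons, List.foldl_nil, ih,
      List.length_cons]
    rw [Finset.sum_range_succ']
    simp only [List.getD_cons_succ, List.getD_cons_zero]
    have : ∑ i ∈ Finset.range xs.length, (if xs.getD i "" == "#" then (2:Int)^(i+1) else 0)
        = 2 * ∑ i ∈ Finset.range xs.length, (if xs.getD i "" == "#" then (2:Int)^i else 0) := by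
      rw [Finset.mul_sum]
      exact Finset.sum_congr rfl (fun i _ => by split_ifs <;> ring_nf)
    rw [this]
    ring_nf

lemma ints_gN (n : Nat) (φ : Nat → Nat → String) :
    pvGridToInts (gN n φ) = (List.range n).map (fun r => encN n (fun c => φ r c == "#")) := by
  unfold pvGridToInts
  rw [PySem.List.enumerate_eq_map_pyRange (d := ([] : List String))]
  rw [show PySem.List.len (gN n φ) = ((n : Nat) : Int) from by
    rw [PySem.List.len_eq, length_gN]]
  rw [PySem.List.pyRange_one, show (((n:Nat):Int) - 0).toNat = n by omega]
  simp only [List.map_map, List.foldl_map, Function.comp, zero_add]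
  rw [show (gN n φ).map (fun _ => (0:Int)) = (List.range n).map (fun _ => (0:Int)) from by
    simp only [gN, List.map_map]; rfl]
  rw [intsOuter n (fun j => (PySem.List.pyGetD (gN n φ) ((j:Nat):Int) []).reverse)
      (fun cell => if cell == "#" then (1:Int) else 0) n (le_refl n)]
  apply rangeMap_congr
  intro r hr
  rw [if_pos hr, pyGetD_gN n φ r hr, encFold]
  simp only [List.length_map, List.length_range, zero_mul, zero_add]
  unfold encN
  apply Finset.sum_congr rfl
  intro c hc
  rw [List.getD_eq_getElem _ _ (by simpa using Finset.mem_range.mp hc)]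
  simp

-- ===== A side: zip(*grid) on a square normal-form grid =====

lemma zip_gN (n : Nat) (hn : 0 < n) (φ : Nat → Nat → String) :
    pvZipStar (gN n φ) = gN n (fun j k => φ k j) := by
  unfold pvZipStar
  have hlen : (gN n φ).map List.length = List.replicate n n := by
    simp only [gN, List.map_map]
    rw [show (List.length ∘ fun r => List.map (φ r) (List.range n)) = (fun _ => n) from
      funext (fun r => by simp)]
    simp [List.map_const']
  rw [hlen, List.min?_replicate_of_pos (by simpa using hn)]
  simp only [Option.getD_some, gN]
  apply rangeMap_congr
  intro j hj
  simp only [List.map_map]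
  apply rangeMap_congr
  intro k hk
  simp only [Function.comp]
  rw [List.getD_eq_getElem _ _ (by simpa using hj)]
  simp

-- ===== B side: encode via a per-row weighted sum =====

lemma encodeFold :
    ∀ (pts : List (Int × Int)) (n : Nat) (g : Nat → Int),
    (∀ p ∈ pts, 0 ≤ p.1 ∧ p.1 < (n : Int)) →
    pts.foldl (fun (out : List Int) p => PySem.List.pySetD out p.1
        (PySem.List.pyGetD out p.1 0 + ((1:Int) <<< p.2.toNat))) ((List.range n).map g)
    = (List.range n).map (fun r =>
        g r + (pts.map (fun p => if p.1 = ((r : Nat) : Int) then (1:Int) <<< p.2.toNat else 0)).sum) := by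
  intro pts
  induction pts with
  | nil =>
    intro n g _
    simp
  | cons p ps ih =>
    intro n g hb
    obtain ⟨hp0, hpn⟩ := hb p List.mem_cons_self
    simp only [List.foldl_cons]
    rw [show p.1 = ((p.1.toNat : Nat) : Int) by omega]
    rw [PySem.List.pySetD_natCast, PySem.List.pyGetD_ofNat _ _ _ (by simp; omega)]
    rw [set_rangeMap n p.1.toNat (by omega)]
    rw [ih n _ (fun q hq => hb q (List.mem_cons_of_mem p hq))]
    apply rangeMap_congr
    intro r hr
    simp only [List.map_cons, List.sum_cons, List.getElem_map, List.getElem_range]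
    by_cases hrp : r = p.1.toNat
    · rw [if_pos hrp, if_pos (by omega)]
      subst hrp
      ring_nf
    · rw [if_neg hrp, if_neg (by omega)]
      ring_nf

lemma pvEncode_eq (n : Nat) (C : Int) (pts : List (Int × Int))
    (hb : ∀ p ∈ pts, 0 ≤ p.1 ∧ p.1 < (n : Int)) :
    pvEncode ((((n : Nat) : Int), C), pts)
    = (List.range n).map (fun r =>
        (pts.map (fun p => if p.1 = ((r : Nat) : Int) then (1:Int) <<< p.2.toNat else 0)).sum) := by
  unfold pvEncode
  rw [show (List.replicate (((n:Nat):Int)).toNat (0:Int)) = (List.range n).map (fun _ => (0:Int)) from by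
    rw [List.map_const']; simp]
  rw [encodeFold pts n _ hb]
  exact rangeMap_congr n _ _ (fun r _ => by simp)

-- ===== B side: the coordinate list of a normal-form grid =====

lemma cells_gN (n : Nat) (φ : Nat → Nat → String) :
    pvCells (gN n φ) ((n : Nat) : Int) ((n : Nat) : Int)
    = (List.range n).flatMap (fun i => (List.range n).filterMap
      (fun c => if φ i c == "#" then some ((i : Int), (c : Int)) else none)) := by
  unfold pvCells
  rw [PySem.List.pyRange_one, show (((n:Nat):Int) - 0).toNat = n by omega]
  simp only [List.flatMap_map]
  apply List.flatMap_congr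
  intro i hi
  have hin : i < n := List.mem_range.mp hi
  simp only [Function.comp, zero_add, pyGetD_gN n φ i hin]
  simp only [List.filterMap_map]
  apply List.filterMap_congr
  intro c hc
  have hcn : c < n := List.mem_range.mp hc
  simp only [Function.comp, zero_add]
  rw [PySem.List.pyGetD_ofNat _ _ _ (by simpa using hcn)]
  simp

lemma cells_bounds (n : Nat) (φ : Nat → Nat → String) :
    ∀ p ∈ (List.range n).flatMap (fun i => (List.range n).filterMap
      (fun c => if φ i c == "#" then some ((i : Int), (c : Int)) else none)),
    (0 ≤ p.1 ∧ p.1 < (n : Int)) ∧ (0 ≤ p.2 ∧ p.2 < (n : Int)) := by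
  intro p hp
  simp only [List.mem_flatMap, List.mem_filterMap, List.mem_range] at hp
  obtain ⟨i, hi, c, hc, hpc⟩ := hp
  by_cases h : φ i c == "#"
  · rw [if_pos h, Option.some.injEq] at hpc
    subst hpc
    exact ⟨⟨by omega, by omega⟩, by omega, by omega⟩
  · rw [if_neg h] at hpc
    cases hpc

lemma sum_map_filterMap_ite {α β : Type} (l : List α) (b : α → Bool) (e : α → β) (W : β → Int) :
    ((l.filterMap (fun x => if b x then some (e x) else none)).map W).sum
    = (l.map (fun x => if b x then W (e x) else 0)).sum := by
  induction l with
  | nil => simp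
  | cons x xs ih =>
    by_cases hx : b x
    · rw [List.filterMap_cons_some (b := e x) (by simp [hx])]
      simp [hx, ih]
    · rw [List.filterMap_cons_none (by simp [hx])]
      simp [hx, ih]

lemma cells_sum (n : Nat) (φ : Nat → Nat → String) (W : Int × Int → Int) :
    (((List.range n).flatMap (fun i => (List.range n).filterMap
        (fun c => if φ i c == "#" then some ((i : Int), (c : Int)) else none))).map W).sum
    = ∑ i ∈ Finset.range n, ∑ c ∈ Finset.range n,
        (if φ i c == "#" then W ((i : Int), (c : Int)) else 0) := by
  rw [List.map_flatMap, List.flatMap_def, List.sum_flatten, List.map_map]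
  have : ∀ f : Nat → Int, ((List.range n).map f).sum = ∑ i ∈ Finset.range n, f i := fun f => rfl
  rw [this]
  apply Finset.sum_congr rfl
  intro i _
  simp only [Function.comp]
  rw [sum_map_filterMap_ite]
  exact this _


-- ===== the D4 reindexing: a bijective coordinate transform turns B's double sum into A's row sum =====

lemma reindex (n r : Nat) (hr : r < n) (b : Nat → Nat → Bool)
    (σ1 σ2 τ1 τ2 : Nat → Nat → Nat)
    (hσ : ∀ i c, i < n → c < n →
      σ1 i c < n ∧ σ2 i c < n ∧ τ1 (σ1 i c) (σ2 i c) = i ∧ τ2 (σ1 i c) (σ2 i c) = c)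
    (hτ : ∀ u v, u < n → v < n →
      τ1 u v < n ∧ τ2 u v < n ∧ σ1 (τ1 u v) (τ2 u v) = u ∧ σ2 (τ1 u v) (τ2 u v) = v) :
    (∑ i ∈ Finset.range n, ∑ c ∈ Finset.range n,
      (if b i c then (if σ1 i c = r then (2:Int)^(σ2 i c) else 0) else 0))
    = ∑ v ∈ Finset.range n, (if b (τ1 r v) (τ2 r v) then (2:Int)^v else 0) := by
  rw [← Finset.sum_product' (Finset.range n) (Finset.range n)
      (fun i c => if b i c then (if σ1 i c = r then (2:Int)^(σ2 i c) else 0) else 0)]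
  have hswap : ∀ p : Nat × Nat,
      (if b p.1 p.2 then (if σ1 p.1 p.2 = r then (2:Int)^(σ2 p.1 p.2) else 0) else 0)
      = (if σ1 p.1 p.2 = r then (if b p.1 p.2 then (2:Int)^(σ2 p.1 p.2) else 0) else 0) := by
    intro p
    split_ifs <;> rfl
  rw [Finset.sum_congr rfl (fun p _ => hswap p)]
  rw [show (∑ p ∈ Finset.range n ×ˢ Finset.range n,
      if σ1 p.1 p.2 = r then (if b p.1 p.2 then (2:Int)^(σ2 p.1 p.2) else 0) else 0)
      = ∑ p ∈ (Finset.range n ×ˢ Finset.range n).filter (fun p => σ1 p.1 p.2 = r),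
        (if b p.1 p.2 then (2:Int)^(σ2 p.1 p.2) else 0) from (Finset.sum_filter _ _).symm]
  refine Finset.sum_nbij' (fun p => σ2 p.1 p.2) (fun v => (τ1 r v, τ2 r v)) ?_ ?_ ?_ ?_ ?_
  · intro p hp
    simp only [Finset.mem_filter, Finset.mem_product, Finset.mem_range] at hp
    simp only [Finset.mem_range]
    exact (hσ p.1 p.2 hp.1.1 hp.1.2).2.1
  · intro v hv
    simp only [Finset.mem_range] at hv
    simp only [Finset.mem_filter, Finset.mem_product, Finset.mem_range]
    obtain ⟨h1, h2, h3, _⟩ := hτ r v hr hv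
    exact ⟨⟨h1, h2⟩, h3⟩
  · intro p hp
    simp only [Finset.mem_filter, Finset.mem_product, Finset.mem_range] at hp
    obtain ⟨⟨h1, h2⟩, h3⟩ := hp
    obtain ⟨_, _, h4, h5⟩ := hσ p.1 p.2 h1 h2
    simp only []
    rw [← h3, h4, h5]
  · intro v hv
    simp only [Finset.mem_range] at hv
    simp only []
    exact (hτ r v hr hv).2.2.2
  · intro p hp
    simp only [Finset.mem_filter, Finset.mem_product, Finset.mem_range] at hp
    obtain ⟨⟨h1, h2⟩, h3⟩ := hp
    obtain ⟨_, _, h4, h5⟩ := hσ p.1 p.2 h1 h2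
    simp only []
    rw [← h3, h4, h5]

-- B's encode of a transformed coordinate list, as a row list of encN values
lemma encode_chain (n : Nat) (hr : 0 < n) (φ : Nat → Nat → String) (chain : Int × Int → Int × Int)
    (σ1 σ2 τ1 τ2 : Nat → Nat → Nat)
    (hchain : ∀ i c : Nat, i < n → c < n →
      chain (((i : Nat) : Int), ((c : Nat) : Int)) = (((σ1 i c : Nat) : Int), ((σ2 i c : Nat) : Int)))
    (hσ : ∀ i c, i < n → c < n →
      σ1 i c < n ∧ σ2 i c < n ∧ τ1 (σ1 i c) (σ2 i c) = i ∧ τ2 (σ1 i c) (σ2 i c) = c)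
    (hτ : ∀ u v, u < n → v < n →
      τ1 u v < n ∧ τ2 u v < n ∧ σ1 (τ1 u v) (τ2 u v) = u ∧ σ2 (τ1 u v) (τ2 u v) = v) :
    pvEncode ((((n : Nat) : Int), ((n : Nat) : Int)),
        ((List.range n).flatMap (fun i => (List.range n).filterMap
          (fun c => if φ i c == "#" then some ((i : Int), (c : Int)) else none))).map chain)
    = (List.range n).map (fun r => encN n (fun c => φ (τ1 r c) (τ2 r c) == "#")) := by
  have hbd := cells_bounds n φ
  have hbmap : ∀ p ∈ ((List.range n).flatMap (fun i => (List.range n).filterMap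
      (fun c => if φ i c == "#" then some ((i : Int), (c : Int)) else none))).map chain,
      0 ≤ p.1 ∧ p.1 < (n : Int) := by
    intro p hp
    obtain ⟨q, hq, rfl⟩ := List.mem_map.mp hp
    obtain ⟨⟨hq1, hq2⟩, hq3, hq4⟩ := hbd q hq
    have hqeq : q = (((q.1.toNat : Nat) : Int), ((q.2.toNat : Nat) : Int)) := by
      cases q; simp at *; omega
    rw [hqeq, hchain q.1.toNat q.2.toNat (by omega) (by omega)]
    have := (hσ q.1.toNat q.2.toNat (by omega) (by omega)).1
    simp
    omega
  rw [pvEncode_eq n _ _ hbmap]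
  apply rangeMap_congr
  intro r hrn
  rw [List.map_map]
  have hW := cells_sum n φ
    ((fun p => if p.1 = ((r : Nat) : Int) then (1:Int) <<< p.2.toNat else 0) ∘ chain)
  rw [hW]
  simp only [Function.comp]
  unfold encN
  rw [← reindex n r hrn (fun i c => φ i c == "#") σ1 σ2 τ1 τ2 hσ hτ]
  apply Finset.sum_congr rfl
  intro i hi
  apply Finset.sum_congr rfl
  intro c hc
  have hin : i < n := Finset.mem_range.mp hi
  have hcn : c < n := Finset.mem_range.mp hc
  rw [hchain i c hin hcn]
  simp only []
  by_cases hb : φ i c == "#"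
  · rw [if_pos hb, if_pos hb]
    by_cases hs : σ1 i c = r
    · rw [if_pos (by exact_mod_cast congrArg (Nat.cast : Nat → Int) hs), if_pos hs]
      rw [Int.toNat_natCast, Int.shiftLeft_natCast_right, Int.shiftLeft_eq, one_mul]
    · rw [if_neg (by intro h; exact hs (by exact_mod_cast h)), if_neg hs]
  · rw [if_neg hb, if_neg hb]

lemma square_eq_gN (G : List (List String)) (hsq : ∀ row ∈ G, row.length = G.length) :
    G = gN G.length (fun r c => (G.getD r []).getD c "") := by
  apply List.ext_getElem (by simp [gN])
  intro i h1 h2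
  simp only [gN, List.getElem_map, List.getElem_range]
  apply List.ext_getElem
  · simp [hsq G[i] (List.getElem_mem h1)]
  intro j h3 h4
  simp only [List.getElem_map, List.getElem_range]
  rw [List.getD_eq_getElem _ _ h1, List.getD_eq_getElem _ _ h3]

lemma empty_eq_replicate (G : List (List String)) (hemp : ∀ row ∈ G, row.length = 0) :
    G = List.replicate G.length [] := by
  apply List.ext_getElem (by simp)
  intro i h1 h2
  rw [List.getElem_replicate]
  exact List.eq_nil_of_length_eq_zero (hemp _ (List.getElem_mem h1))

lemma encN_congr (n : Nat) (b b' : Nat → Bool) (h : ∀ c, c < n → b c = b' c) :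
    encN n b = encN n b' :=
  Finset.sum_congr rfl (fun c hc => by rw [h c (Finset.mem_range.mp hc)])

lemma variant_eq (n : Nat) (hn : 0 < n) (φ : Nat → Nat → String)
    {chain : Int × Int → Int × Int} {A : Nat → Nat → Bool}
    (σ1 σ2 τ1 τ2 : Nat → Nat → Nat)
    (hchain : ∀ i c : Nat, i < n → c < n →
      chain (((i : Nat) : Int), ((c : Nat) : Int)) = (((σ1 i c : Nat) : Int), ((σ2 i c : Nat) : Int)))
    (hσ : ∀ i c, i < n → c < n →
      σ1 i c < n ∧ σ2 i c < n ∧ τ1 (σ1 i c) (σ2 i c) = i ∧ τ2 (σ1 i c) (σ2 i c) = c)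
    (hτ : ∀ u v, u < n → v < n →
      τ1 u v < n ∧ τ2 u v < n ∧ σ1 (τ1 u v) (τ2 u v) = u ∧ σ2 (τ1 u v) (τ2 u v) = v)
    (hA : ∀ r c, r < n → c < n → A r c = (φ (τ1 r c) (τ2 r c) == "#")) :
    (List.range n).map (fun r => encN n (fun c => A r c))
    = pvEncode ((((n : Nat) : Int), ((n : Nat) : Int)),
        ((List.range n).flatMap (fun i => (List.range n).filterMap
          (fun c => if φ i c == "#" then some ((i : Int), (c : Int)) else none))).map chain) := by
  rw [encode_chain n hn φ chain σ1 σ2 τ1 τ2 hchain hσ hτ]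
  apply rangeMap_congr
  intro r hr
  exact encN_congr n _ _ (fun c hc => hA r c hr hc)

lemma main_square (n : Nat) (hn : 0 < n) (φ : Nat → Nat → String) :
    grid_to_shape (gN n φ) = grid_to_shape_alt (gN n φ) := by
  have hcols : ((gN n φ).headD []).length = n := by
    cases n with
    | zero => omega
    | succ m => simp [gN, List.range_succ_eq_map]
  unfold grid_to_shape grid_to_shape_alt
  simp only [show List.range 4 = [0,1,2,3] from rfl, List.foldl_cons, List.foldl_nil]
  simp only [rotate_gN n hn, zip_gN n hn, ints_gN n]
  simp only [length_gN, hcols, cells_gN n φ, pvRot, pvTrans, List.map_map]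
  simp only [List.nil_append, List.cons_append]
  congr 1
  simp only [List.cons.injEq, and_true]
  refine ⟨?_, ?_, ?_, ?_, ?_, ?_, ?_, ?_⟩
  · rw [show ((List.range n).flatMap (fun i => (List.range n).filterMap
        (fun c => if φ i c == "#" then some ((i : Int), (c : Int)) else none)))
        = ((List.range n).flatMap (fun i => (List.range n).filterMap
        (fun c => if φ i c == "#" then some ((i : Int), (c : Int)) else none))).map (fun p => p)
        from (List.map_id' _).symm]
    apply variant_eq n hn φ (fun i c => i) (fun i c => c) (fun u v => u) (fun u v => v)
    · intro i c hi hc; rfl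
    · intro i c hi hc; exact ⟨hi, hc, rfl, rfl⟩
    · intro u v hu hv; exact ⟨hu, hv, rfl, rfl⟩
    · intro r c hr hc; rfl
  · apply variant_eq n hn φ (fun i c => c) (fun i c => n - 1 - i) (fun u v => n - 1 - v) (fun u v => u)
    · intro i c hi hc
      simp only [Function.comp_apply, Prod.mk.injEq] <;>
        first
        | trivial
        | (constructor <;> first | trivial | omega)
    · intro i c hi hc
      refine ⟨by omega, by omega, by omega, by omega⟩
    · intro u v hu hv
      refine ⟨by omega, by omega, by omega, by omega⟩
    · intro r c hr hc
      congr 2 <;> omega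
  · apply variant_eq n hn φ (fun i c => n - 1 - i) (fun i c => n - 1 - c) (fun u v => n - 1 - u) (fun u v => n - 1 - v)
    · intro i c hi hc
      simp only [Function.comp_apply, Prod.mk.injEq] <;>
        first
        | trivial
        | (constructor <;> first | trivial | omega)
    · intro i c hi hc
      refine ⟨by omega, by omega, by omega, by omega⟩
    · intro u v hu hv
      refine ⟨by omega, by omega, by omega, by omega⟩
    · intro r c hr hc
      congr 2 <;> omega
  · apply variant_eq n hn φ (fun i c => n - 1 - c) (fun i c => i) (fun u v => v) (fun u v => n - 1 - u)
    · intro i c hi hc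
      simp only [Function.comp_apply, Prod.mk.injEq] <;>
        first
        | trivial
        | (constructor <;> first | trivial | omega)
    · intro i c hi hc
      refine ⟨by omega, by omega, by omega, by omega⟩
    · intro u v hu hv
      refine ⟨by omega, by omega, by omega, by omega⟩
    · intro r c hr hc
      congr 2 <;> omega
  · apply variant_eq n hn φ (fun i c => c) (fun i c => i) (fun u v => v) (fun u v => u)
    · intro i c hi hc
      simp only [Function.comp_apply, Prod.mk.injEq] <;>
        first
        | trivial
        | (constructor <;> first | trivial | omega)
    · intro i c hi hc
      refine ⟨by omega, by omega, by omega, by omega⟩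
    · intro u v hu hv
      refine ⟨by omega, by omega, by omega, by omega⟩
    · intro r c hr hc
      congr 2 <;> omega
  · apply variant_eq n hn φ (fun i c => i) (fun i c => n - 1 - c) (fun u v => u) (fun u v => n - 1 - v)
    · intro i c hi hc
      simp only [Function.comp_apply, Prod.mk.injEq] <;>
        first
        | trivial
        | (constructor <;> first | trivial | omega)
    · intro i c hi hc
      refine ⟨by omega, by omega, by omega, by omega⟩
    · intro u v hu hv
      refine ⟨by omega, by omega, by omega, by omega⟩
    · intro r c hr hc
      congr 2 <;> omega
  · apply variant_eq n hn φ (fun i c => n - 1 - c) (fun i c => n - 1 - i) (fun u v => n - 1 - v) (fun u v => n - 1 - u)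
    · intro i c hi hc
      simp only [Function.comp_apply, Prod.mk.injEq] <;>
        first
        | trivial
        | (constructor <;> first | trivial | omega)
    · intro i c hi hc
      refine ⟨by omega, by omega, by omega, by omega⟩
    · intro u v hu hv
      refine ⟨by omega, by omega, by omega, by omega⟩
    · intro r c hr hc
      congr 2 <;> omega
  · apply variant_eq n hn φ (fun i c => n - 1 - i) (fun i c => c) (fun u v => n - 1 - u) (fun u v => v)
    · intro i c hi hc
      simp only [Function.comp_apply, Prod.mk.injEq] <;>
        first
        | trivial
        | (constructor <;> first | trivial | omega)
    · intro i c hi hc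
      refine ⟨by omega, by omega, by omega, by omega⟩
    · intro u v hu hv
      refine ⟨by omega, by omega, by omega, by omega⟩
    · intro r c hr hc
      congr 2 <;> omega

-- ===== the all-rows-empty case =====

lemma ints_repl (n : Nat) :
    pvGridToInts (List.replicate n ([] : List String)) = List.replicate n (0:Int) := by
  unfold pvGridToInts
  have h1 := PySem.List.foldl_congr_mem
    (l := PySem.List.enumerate (List.replicate n ([] : List String)))
    (init := (List.replicate n ([] : List String)).map (fun _ => (0:Int)))
    (f := fun result iv => iv.2.reverse.foldl (fun res cell =>
      PySem.List.pySetD res iv.1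
        (PySem.List.pyGetD res iv.1 0 * 2 + (if cell == "#" then 1 else 0))) result)
    (g := fun result _ => result)
    (by
      intro acc x hx
      obtain ⟨k, hk, rfl⟩ := (PySem.List.mem_enumerate_iff _ _ _).mp hx
      simp)
  rw [h1, PySem.List.foldl_ignore]
  simp

lemma rot_repl (n : Nat) :
    pvRotateGrid (List.replicate n ([] : List String)) = List.replicate n [] := by
  unfold pvRotateGrid
  have h0 : (PySem.List.pyGetD (List.replicate n ([] : List String)) 0 []) = [] := by
    cases n with
    | zero => rfl
    | succ m =>
      rw [show (0:Int) = ((0:Nat):Int) from rfl, PySem.List.pyGetD_ofNat _ _ _ (by simp)]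
      simp
  rw [h0]
  simp only [List.length_nil, Nat.cast_zero, PySem.List.pyRange_one_eq_nil (le_refl 0),
    List.foldl_nil]
  rw [PySem.List.foldl_ignore]
  simp

lemma zip_repl (n : Nat) :
    pvZipStar (List.replicate n ([] : List String)) = [] := by
  unfold pvZipStar
  cases n with
  | zero => rfl
  | succ m =>
    simp [List.map_replicate, List.min?_replicate_of_pos]

lemma cells_repl (n : Nat) :
    pvCells (List.replicate n ([] : List String)) ((n : Nat) : Int) 0 = [] := by
  unfold pvCells
  apply List.flatMap_eq_nil_iff.mpr
  intro x hx
  rw [show (0:Int) = ((0:Nat):Int) from rfl, PySem.List.pyRange_one]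
  simp

lemma ofList_two (n : Nat) :
    PySem.Set.ofList [List.replicate n (0:Int), List.replicate n 0, List.replicate n 0,
        List.replicate n 0, [], [], [], []]
    = PySem.Set.ofList [List.replicate n (0:Int), [], List.replicate n 0, [], [],
        List.replicate n 0, [], List.replicate n 0] := by
  cases n with
  | zero => rfl
  | succ m =>
    have hz : List.replicate (m+1) (0:Int) ≠ [] := by simp
    rw [PySem.Set.ofList_eq_foldl, PySem.Set.ofList_eq_foldl]
    simp [PySem.Set.add, PySem.Set.contains, List.foldl_cons, hz, Ne.symm hz]

lemma main_empty (n : Nat) :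
    grid_to_shape (List.replicate n ([] : List String))
    = grid_to_shape_alt (List.replicate n []) := by
  unfold grid_to_shape grid_to_shape_alt
  simp only [show List.range 4 = [0,1,2,3] from rfl, List.foldl_cons, List.foldl_nil]
  rw [show (List.replicate n ([] : List String)).headD [] = [] from by cases n <;> rfl]
  simp only [ints_repl, rot_repl, zip_repl, List.length_replicate,
    List.length_nil, Nat.cast_zero, cells_repl, pvRot, pvTrans, List.map_nil]
  simp only [show pvGridToInts [] = [] from rfl, show pvRotateGrid [] = [] from rfl]
  simp only [show ∀ R C : Int, pvEncode ((R, C), []) = List.replicate R.toNat 0 from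
    fun R C => rfl]
  simp only [Int.toNat_natCast, Nat.cast_zero, Int.toNat_zero]
  simp only [List.nil_append, List.cons_append]
  exact ofList_two n

-- ===== VERDICT (by name: the statement is the Claim_ definition above) =====
theorem grid_to_shape_spec : Claim_equal_grid_to_shape := by
  intro G hdom hpre
  unfold Spec_grid_to_shape
  rcases hpre with hsq | hemp
  · rcases Nat.eq_zero_or_pos G.length with h0 | hn
    · have hnil : G = [] := List.eq_nil_of_length_eq_zero h0
      subst hnil
      rfl
    · rw [square_eq_gN G hsq]
      exact main_square G.length hn _
  · rw [empty_eq_replicate G hemp]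
    exact main_empty G.length
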